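-- pv_equiv track=rewrite | github.com/kluczak12/Analiza-irysow | kNN.py | wyborMaxGatunku
-- ===== SOURCE A (Python) =====
-- def wyborMaxGatunku(tablica):
--     maxIndexGatunku = 0
--     for i in range(1, len(tablica)):
--         if tablica[i] > tablica[maxIndexGatunku]:
--             maxIndexGatunku = i
--     licznik = sum(1 for i in tablica if i == tablica[maxIndexGatunku])
--     if licznik > 1:                         # czyli gdy więcej niż jedna wartość jest równa max
--         maxIndexGatunku = -1                # remis, trochę jak rzucanie wyjątku
--     return maxIndexGatunku                  #zwracamy pozycje elementu, czyli nr gatunku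
-- ===== SOURCE B (Python) =====
-- def wyborMaxGatunku(tablica):
--     s = sorted(tablica, reverse=True)
--     if len(s) > 1 and s[0] == s[1]:
--         return -1
--     return tablica.index(s[0])
-- ===== Notes on version B (the rewrite author's own statement) =====
-- stated objective: alternative
-- what changed: Replaces A's index-tracking argmax scan plus a generator tally with a sort-based algorithm: sort descending, detect a tie by comparing the two largest sorted elements, otherwise locate the maximum in the original list with index(); B raises IndexError on the empty list (where A returns the accidental sentinel 0), so Pre_ excludes the empty list.
-- outside the precondition, e.g. on wyborMaxGatunku([]): A returns 0, B raises IndexError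
import Mathlib
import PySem

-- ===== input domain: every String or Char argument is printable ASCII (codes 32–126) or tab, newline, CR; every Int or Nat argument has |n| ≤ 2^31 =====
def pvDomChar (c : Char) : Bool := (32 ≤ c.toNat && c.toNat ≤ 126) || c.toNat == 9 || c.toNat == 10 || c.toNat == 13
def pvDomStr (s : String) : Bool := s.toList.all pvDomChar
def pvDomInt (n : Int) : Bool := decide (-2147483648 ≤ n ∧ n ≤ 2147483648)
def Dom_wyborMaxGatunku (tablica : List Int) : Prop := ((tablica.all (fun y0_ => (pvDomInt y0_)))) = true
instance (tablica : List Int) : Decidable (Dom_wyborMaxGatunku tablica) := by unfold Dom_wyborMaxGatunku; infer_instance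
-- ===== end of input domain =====

-- B replaces A's index-tracking argmax scan + generator tally with a sort-based algorithm:
-- sort descending, tie iff the two largest sorted elements are equal, else index() of the max
-- (objective: alternative). B raises on the empty list, which Pre_ excludes (A returns the sentinel 0 there).

-- ===== PORT A =====
-- A's argmax loop: for i in range(1, len(tablica)): if tablica[i] > tablica[maxIndexGatunku]: maxIndexGatunku = i
def wmgStep (t : List Int) (m i : Int) : Int :=
  if PySem.List.pyGetD t i 0 > PySem.List.pyGetD t m 0 then i else m

def wmgLoop (t : List Int) (b : Int) : Int :=
  (PySem.List.pyRange 1 b 1).foldl (wmgStep t) 0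

def wyborMaxGatunku (tablica : List Int) : Int :=
  let maxIdx := wmgLoop tablica (tablica.length : Int)
  -- licznik = sum(1 for i in tablica if i == tablica[maxIndexGatunku]); on [] the generator
  -- never evaluates tablica[maxIdx], so the default of pyGetD is never observed.
  let licznik : Int :=
    (tablica.map (fun x => if x = PySem.List.pyGetD tablica maxIdx 0 then (1:Int) else 0)).sum
  if licznik > 1 then -1 else maxIdx

-- ===== PORT B =====
-- s = sorted(tablica, reverse=True); if len(s) > 1 and s[0] == s[1]: return -1; return tablica.index(s[0])
def wyborMaxGatunku_alt (tablica : List Int) : Int :=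
  let s := PySem.List.sorted tablica (fun x => x) true
  if 1 < s.length ∧ PySem.List.pyGetD s 0 0 = PySem.List.pyGetD s 1 0 then -1
  else
    match PySem.List.index? tablica (PySem.List.pyGetD s 0 0) with
    | some k => (k : Int)
    | none => 0   -- unreachable under Pre_: indexing the sorted list raises only on the empty list

-- ===== PRECONDITION & SPEC =====
-- Pre_ excludes only the empty list: Python B raises IndexError there (indexing the empty sorted list),
-- while A returns the accidental sentinel 0.
def Pre_wyborMaxGatunku (tablica : List Int) : Prop := tablica ≠ []
instance (tablica : List Int) : Decidable (Pre_wyborMaxGatunku tablica) := by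
  unfold Pre_wyborMaxGatunku; infer_instance

def pvWitness_wyborMaxGatunku : List Int := [3, 7, 5]

def Spec_wyborMaxGatunku (tablica : List Int) (out : Int) : Prop := out = wyborMaxGatunku_alt tablica
instance (tablica : List Int) (out : Int) : Decidable (Spec_wyborMaxGatunku tablica out) := by
  unfold Spec_wyborMaxGatunku; infer_instance

-- ===== CLAIM (what is proved, stated in full; the proofs are below) =====
def Claim_equal_wyborMaxGatunku : Prop := ∀ (tablica : List Int), Dom_wyborMaxGatunku tablica → Pre_wyborMaxGatunku tablica → Spec_wyborMaxGatunku tablica (wyborMaxGatunku tablica)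

-- ===== LEMMAS AND PROOFS =====

-- The loop invariant of A's scan over range(1, k): the accumulator is the first argmax of the
-- first k elements.
lemma wmgLoop_inv (t : List Int) :
    ∀ k : Nat, 1 ≤ k → k ≤ t.length →
      ∃ j : Nat, wmgLoop t (k : Int) = (j : Int) ∧ j < k ∧
        (∀ i, i < k → t.getD i 0 ≤ t.getD j 0) ∧
        (∀ i, i < j → t.getD i 0 < t.getD j 0) := by
  intro k
  induction k with
  | zero => omega
  | succ k ih =>
    intro _ hle
    by_cases hk1 : k = 0
    · subst hk1
      refine ⟨0, ?_, by omega, ?_, by omega⟩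
      · simp [wmgLoop, PySem.List.pyRange_one_eq_nil (by norm_num : (1:Int) ≤ 1)]
      · intro i hi; interval_cases i; exact le_refl _
    · obtain ⟨j, hj, hjk, hmax, hfirst⟩ := ih (by omega) (by omega)
      have hsplit : PySem.List.pyRange 1 ((k:Int)+1) 1
          = PySem.List.pyRange 1 (k:Int) 1 ++ [(k:Int)] :=
        PySem.List.pyRange_one_succ_right (by exact_mod_cast Nat.one_le_iff_ne_zero.mpr hk1)
      have hcast : ((k+1:Nat) : Int) = (k:Int)+1 := by push_cast; ring
      have hstep : wmgLoop t ((k:Int)+1) = wmgStep t (j:Int) (k:Int) := by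
        rw [wmgLoop, hsplit, List.foldl_append, ← wmgLoop, hj]
        simp [List.foldl]
      by_cases hgt : t.getD k 0 > t.getD j 0
      · refine ⟨k, ?_, by omega, ?_, ?_⟩
        · rw [hcast, hstep, wmgStep, PySem.List.pyGetD_natCast, PySem.List.pyGetD_natCast,
            if_pos hgt]
        · intro i hi
          rcases Nat.lt_succ_iff_lt_or_eq.mp hi with h | h
          · exact le_of_lt (lt_of_le_of_lt (hmax i h) hgt)
          · subst h; exact le_refl _
        · intro i hi
          exact lt_of_le_of_lt (hmax i hi) hgt
      · refine ⟨j, ?_, by omega, ?_, hfirst⟩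
        · rw [hcast, hstep, wmgStep, PySem.List.pyGetD_natCast, PySem.List.pyGetD_natCast,
            if_neg hgt]
        · intro i hi
          rcases Nat.lt_succ_iff_lt_or_eq.mp hi with h | h
          · exact hmax i h
          · subst h; exact le_of_not_gt hgt

-- the 0/1 generator sum of A counts the occurrences of v
lemma wmg_sum_eq_count (t : List Int) (v : Int) :
    (t.map (fun x => if x = v then (1:Int) else 0)).sum = (t.count v : Int) := by
  induction t with
  | nil => simp
  | cons x xs ih =>
    simp only [List.map_cons, List.sum_cons, List.count_cons, beq_iff_eq, ih]
    split_ifs <;> push_cast <;> ring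

-- ===== VERDICT (by name: the statement is the Claim_ definition above) =====
theorem wyborMaxGatunku_spec : Claim_equal_wyborMaxGatunku := by
  intro t _ hpre
  unfold Spec_wyborMaxGatunku
  have hlen1 : 1 ≤ t.length := by
    cases t with
    | nil => exact absurd rfl hpre
    | cons h tl => simp
  obtain ⟨j, hj, hjk, hmax, hfirst⟩ := wmgLoop_inv t t.length hlen1 le_rfl
  -- the sorted descending list and its head, the maximum
  obtain ⟨m, r, hs⟩ : ∃ m r, PySem.List.sorted t (fun x => x) true = m :: r := by
    cases hsm : PySem.List.sorted t (fun x => x) true with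
    | nil => exact absurd ((PySem.List.sorted_eq_nil_iff t (fun x => x) true).mp hsm) hpre
    | cons m r => exact ⟨m, r, rfl⟩
  have hperm : (m :: r).Perm t := hs ▸ PySem.List.sorted_perm t (fun x => x) true
  have hub : ∀ y ∈ t, y ≤ m := PySem.List.key_head_sorted_rev_ge t (fun x => x) hs
  have hmem : m ∈ t := hperm.mem_iff.mp List.mem_cons_self
  have hpw : (m :: r).Pairwise (fun a b => b ≤ a) := by
    have := PySem.List.sorted_pairwise_rev t (fun x => x)
    rw [hs] at this; exact this
  -- A's argmax value equals m
  have hjM : t.getD j 0 = m := by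
    apply le_antisymm
    · refine hub _ ?_
      rw [List.getD_eq_getElem _ 0 hjk]
      exact List.getElem_mem hjk
    · obtain ⟨i, hi, hiM⟩ := List.mem_iff_getElem.mp hmem
      have hle := hmax i hi
      rw [List.getD_eq_getElem _ 0 hi, hiM] at hle
      exact hle
  -- the tie condition of A and the tie condition of B agree: count t m > 1 ↔ m ∈ r
  have hcnt : t.count m = (m :: r).count m := (hperm.count_eq m).symm
  have htie : 1 < t.count m ↔ m ∈ r := by
    rw [hcnt, List.count_cons_self]
    constructor
    · intro h1
      have : 0 < r.count m := by omega
      exact List.count_pos_iff.mp this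
    · intro hmr
      have : 0 < r.count m := List.count_pos_iff.mpr hmr
      omega
  -- A in terms of the count of the maximum
  have hA : wyborMaxGatunku t
      = if ((t.count m : Int)) > 1 then -1 else (j:Int) := by
    simp only [wyborMaxGatunku]
    rw [hj, PySem.List.pyGetD_natCast, hjM, wmg_sum_eq_count]
  -- B's branch condition in terms of m ∈ r
  have hBcond : (1 < (m :: r).length ∧
      PySem.List.pyGetD (m :: r) 0 0 = PySem.List.pyGetD (m :: r) 1 0) ↔ m ∈ r := by
    cases r with
    | nil =>
      simp
    | cons m' r' =>
      have h0 : PySem.List.pyGetD (m :: m' :: r') 0 0 = m := by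
        simp [PySem.List.pyGetD_ofNat']
      have h1 : PySem.List.pyGetD (m :: m' :: r') 1 0 = m' := by
        simp [PySem.List.pyGetD_ofNat']
      rw [h0, h1]
      constructor
      · intro ⟨_, hmm'⟩
        rw [hmm']; exact List.mem_cons_self
      · intro hmr
        refine ⟨by simp, ?_⟩
        -- m ∈ m'::r' and list descending: m' ≤ m and m ≤ m', so m = m'
        have hm'le : m' ≤ m := (List.pairwise_cons.mp hpw).1 m' List.mem_cons_self
        have hm'int : m' ∈ t := hperm.mem_iff.mp (List.mem_cons_of_mem _ List.mem_cons_self)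
        rcases List.mem_cons.mp hmr with h | h
        · exact h
        · -- m ∈ r': m ≤ m' by pairwise of m'::r'
          have hpw' : (m' :: r').Pairwise (fun a b => b ≤ a) := (List.pairwise_cons.mp hpw).2
          have hlem' : m ≤ m' := (List.pairwise_cons.mp hpw').1 m h
          omega
  -- B's index of m is exactly A's argmax index j (first occurrence of the maximum)
  have hjM' : t[j]'hjk = m := by
    rw [← List.getD_eq_getElem _ 0 hjk]; exact hjM
  have hidx : PySem.List.index? t m = some j := by
    rw [PySem.List.index?_eq_some_iff]
    refine ⟨t.take j, t.drop (j+1), ?_, ?_, ?_⟩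
    · conv_lhs => rw [← List.take_append_drop j t]
      congr 1
      rw [show t.drop j = t[j]'hjk :: t.drop (j+1) from
        (List.getElem_cons_drop hjk).symm, hjM']
    · exact List.length_take_of_le (le_of_lt hjk)
    · intro hmem'
      obtain ⟨i, hi, hiM⟩ := List.mem_iff_getElem.mp hmem'
      have hij : i < j := by
        have hlt := List.length_take_of_le (le_of_lt hjk) ▸ hi
        omega
      have hij' : i < t.length := lt_trans hij hjk
      have hti : (t.take j)[i] = t[i]'hij' := List.getElem_take
      rw [hti] at hiM
      have hlt2 := hfirst i hij
      rw [List.getD_eq_getElem _ 0 hij', List.getD_eq_getElem _ 0 hjk, hiM, hjM'] at hlt2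
      exact lt_irrefl _ hlt2
  have h0m : PySem.List.pyGetD (m :: r) 0 0 = m := by
    simp [PySem.List.pyGetD_ofNat']
  rw [hA]
  simp only [wyborMaxGatunku_alt, hs]
  by_cases hc : m ∈ r
  · rw [if_pos (by exact_mod_cast htie.mpr hc), if_pos (hBcond.mpr hc)]
  · rw [if_neg (by exact_mod_cast fun h => hc (htie.mp h)),
      if_neg (fun h => hc (hBcond.mp h)), h0m, hidx]
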